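-- pv_equiv track=rewrite | github.com/mxsjoberg/playground | python/alu_app.py | ALU
-- ===== SOURCE A (Python) =====
-- def binary_to_signed(lst):
--     binary_str = ''.join(map(str, lst))
--     if (binary_str[0] == '1'):
--         # invert bits
--         inverted_str = ''.join(['1' if c == '0' else '0' for c in binary_str[1:]])
--         decimal = -int(inverted_str, 2) - 1
--     else:
--         decimal = int(binary_str, 2)
--     return decimal
--
-- def twos_complement_addition(a, b):
--     # convert to binary strings
--     a_bin = ''.join(map(str, a))
--     b_bin = ''.join(map(str, b))
--     # bits
--     bits = max(len(a_bin), len(b_bin))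
--     # convert to twos complement
--     a_twos = int(a_bin, 2)
--     b_twos = int(b_bin, 2)
--     # addition
--     result_twos = a_twos + b_twos
--     # convert result to binary string
--     result = bin(result_twos & (2 ** bits - 1))[2:]
--     # convert result to list of ints
--     result = list(map(int, result))
--     # padding (if needed)
--     if (len(result) < bits):
--         for bit in range(bits - len(result)):
--             # append to front
--             result.insert(0, 0)
--     return list(map(int, result))
--
-- def ALU(x, y, zx=0, nx=0, zy=0, ny=0, f=0, no=0):
--     out = [0] * len(x)
--     zr=0
--     ng=0
--     # if (zx == 1)  set x = 0
--     if zx == 1: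
--         for i in range(len(x)): x[i] = 0
--     # if (nx == 1)  set x = ~x
--     if nx == 1:
--         for i in range(len(x)):
--             if x[i] == 1: x[i] = 0
--             else: x[i] = 1
--     # if (zy == 1)  set y = 0
--     if zy == 1:
--         for i in range(len(y)): y[i] = 0
--     # if (ny == 1)  set y = ~y
--     if ny == 1:
--         for i in range(len(y)):
--             if y[i] == 1: y[i] = 0
--             else: y[i] = 1
--     # if (f == 1)   set out = x + y
--     if f == 1:
--         out = twos_complement_addition(x, y)
--     # if (f == 0)   set out = x & y
--     if f == 0:
--         for i in range(len(x)):
--             if x[i] and y[i]: out[i] = 1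
--             else: out[i] = 0
--     # if (no == 1)  set out = ~out
--     if no == 1:
--         for i in range(len(out)):
--             if out[i] == 1: out[i] = 0
--             else: out[i] = 1
--     # if (out == 0) set zr = 1
--     if all(bit == 0 for bit in out):
--         zr = 1
--     # if (out < 0)  set ng = 1
--     out_decimal = binary_to_signed(out)
--     if out_decimal < 0:
--         ng = 1
--     return out, zr, ng
-- ===== SOURCE B (Python) =====
-- # B: integer-arithmetic re-implementation of the Hack ALU simulation: each
-- # operand bit list is folded into an integer once, the control bits act as
-- # integer arithmetic (zero, complement = mask - v, add mod 2**n, bitwise AND,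
-- # output 0 when f selects no operation), the flags are read off the result
-- # integer, and the result is decoded back to a bit list once at the end.
-- # Unlike the original, B does not mutate x and y in place.
--
-- def _to_int(bits):
--     return int(''.join('1' if b == 1 else '0' for b in bits), 2) if bits else 0
--
-- def _to_bits(v, width):
--     return [1 if c == '1' else 0 for c in bin(v)[2:].zfill(width)]
--
-- def ALU(x, y, zx=0, nx=0, zy=0, ny=0, f=0, no=0):
--     n = len(x)
--     mask = (1 << n) - 1
--     xi = _to_int(x)
--     yi = _to_int(y)
--     if zx == 1:
--         xi = 0
--     if nx == 1:
--         xi = mask - xi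
--     if zy == 1:
--         yi = 0
--     if ny == 1:
--         yi = mask - yi
--     if f == 1:
--         oi = (xi + yi) % (1 << n)
--     elif f == 0:
--         oi = xi & yi
--     else:
--         oi = 0
--     if no == 1:
--         oi = mask - oi
--     out = _to_bits(oi, n)
--     zr = 1 if oi == 0 else 0
--     ng = 1 if 2 * oi >= 1 << n else 0
--     return out, zr, ng
-- ===== Notes on version B (the rewrite author's own statement) =====
-- stated objective: idiomatic
-- what changed: Replaces A's per-bit loops and string-based binary arithmetic (join/int(s,2)/bin/insert-padding/binary_to_signed) with one fold of each operand into an integer, integer arithmetic for zero/complement/add-mod-2^n/AND and for the zr/ng flags, and a single decode back to a bit list; B does not mutate x and y in place; …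
-- outside the precondition, e.g. on ALU([1, 0], [0, 1, 1], 0, 0, 0, 0, 0, 0): A returns ([0, 0], 1, 0), B returns ([1, 0], 0, 1); on ALU([2, 0], [1, 1], 0, 0, 0, 0, 0, 0): A returns ([1, 0], 0, 1), B returns ([0, 0], 1, 0); on ALU([1, 1], [0, 1, 0], 0, 0, 0, 0, 1, 0): A returns ([1, 0, 1], 0, 1), B returns ([0, 1], 0, 0)
import Mathlib
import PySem

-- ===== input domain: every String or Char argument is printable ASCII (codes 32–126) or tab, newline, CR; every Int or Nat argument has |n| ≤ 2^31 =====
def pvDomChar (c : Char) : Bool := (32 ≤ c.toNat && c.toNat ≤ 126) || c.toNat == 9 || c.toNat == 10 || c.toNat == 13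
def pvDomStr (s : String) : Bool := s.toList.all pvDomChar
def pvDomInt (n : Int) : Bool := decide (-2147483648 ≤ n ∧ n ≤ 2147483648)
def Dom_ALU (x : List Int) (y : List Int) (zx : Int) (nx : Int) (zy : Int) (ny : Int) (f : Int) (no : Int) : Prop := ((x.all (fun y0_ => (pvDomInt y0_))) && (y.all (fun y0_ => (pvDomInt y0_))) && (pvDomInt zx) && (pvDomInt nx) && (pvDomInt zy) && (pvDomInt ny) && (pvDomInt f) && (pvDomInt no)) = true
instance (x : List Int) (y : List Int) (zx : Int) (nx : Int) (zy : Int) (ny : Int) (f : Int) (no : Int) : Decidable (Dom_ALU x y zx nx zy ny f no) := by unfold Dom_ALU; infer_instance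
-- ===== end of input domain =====

-- B replaces A's per-bit loops and string-based binary arithmetic by one integer
-- conversion of each operand, integer arithmetic for every ALU stage and flag, and
-- a single decode of the result (objective: idiomatic; same O(n) cost).
-- A mutates x and y in place and B does not; the equivalence is about the return value.

-- ===== PORT A =====
-- int(s, 2): exact on nonempty strings of '0'/'1' digits — the only strings A builds
-- under Pre_ALU (no sign/space/underscore); Python raises ValueError elsewhere.
def pvBitVal (cs : List Char) : Int :=
  cs.foldl (fun v c => 2 * v + (if c = '1' then 1 else 0)) 0

-- ''.join(map(str, lst))  (a string is modelled as its List Char)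
def pvJoinStr (lst : List Int) : List Char :=
  lst.flatMap (fun n => PySem.Int.toChars n)

def binary_to_signed (lst : List Int) : Int :=
  if PySem.List.pyGet? (pvJoinStr lst) 0 = some '1' then
    -- inverted_str built over binary_str[1:] (= drop 1, exact for lists)
    -(pvBitVal (((pvJoinStr lst).drop 1).map (fun ch => if ch = '0' then '1' else '0'))) - 1
  else
    -- on empty input Python raises IndexError at binary_str[0] (outside Pre_ALU)
    pvBitVal (pvJoinStr lst)

-- bin(n)[2:] for n ≥ 0, rendered via Mathlib's Nat.digits (exact)
def pvBin (n : Nat) : List Char :=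
  if n = 0 then ['0'] else (Nat.digits 2 n).reverse.map (fun d => if d = 1 then '1' else '0')

def twos_complement_addition (a b : List Int) : List Int :=
  let a_bin := pvJoinStr a
  let b_bin := pvJoinStr b
  let bits := max a_bin.length b_bin.length
  let a_twos := pvBitVal a_bin
  let b_twos := pvBitVal b_bin
  let result_twos := a_twos + b_twos
  -- bin(result_twos & (2 ** bits - 1))[2:]
  let result := pvBin (PySem.Int.band result_twos (2 ^ bits - 1)).toNat
  -- list(map(int, result)); int(c) exact on the '0'/'1' chars pvBin yields
  let result := result.map (fun c => if c = '1' then (1 : Int) else 0)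
  -- padding: the loop prepends (bits - len(result)) zeros
  if result.length < bits then List.replicate (bits - result.length) (0 : Int) ++ result
  else result

def ALU (x : List Int) (y : List Int) (zx : Int) (nx : Int) (zy : Int) (ny : Int) (f : Int) (no : Int) : List Int × Int × Int :=
  let out := List.replicate x.length (0 : Int)
  let x := if zx = 1 then x.map (fun _ => (0 : Int)) else x
  let x := if nx = 1 then x.map (fun b => if b = 1 then (0 : Int) else 1) else x
  let y := if zy = 1 then y.map (fun _ => (0 : Int)) else y
  let y := if ny = 1 then y.map (fun b => if b = 1 then (0 : Int) else 1) else y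
  let out := if f = 1 then twos_complement_addition x y else out
  -- f == 0: out[i] = 1 iff x[i] and y[i] are truthy; y[i] is an IndexError when
  -- len(y) < len(x) (outside Pre_ALU; getD is exact inside it)
  let out := if f = 0 then (List.range x.length).map (fun i => if x.getD i 0 ≠ 0 ∧ y.getD i 0 ≠ 0 then (1 : Int) else 0) else out
  let out := if no = 1 then out.map (fun b => if b = 1 then (0 : Int) else 1) else out
  let zr : Int := if out.all (fun b => b == 0) then 1 else 0
  let ng : Int := if binary_to_signed out < 0 then 1 else 0
  (out, zr, ng)

-- ===== PORT B =====
-- int(''.join('1' if b == 1 else '0' for b in bits), 2) if bits else 0: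
-- the digit string is always a valid binary numeral, so int(s, 2) is pvBitVal
-- (A's int(s, 2) helper, exact on such strings)
def toIntB (bits : List Int) : Int :=
  if bits = [] then 0 else pvBitVal (bits.map (fun b => if b = 1 then '1' else '0'))

-- [1 if c == '1' else 0 for c in bin(v)[2:].zfill(width)] (v ≥ 0 at every call
-- site); bin(v)[2:] is pvBin, zfill prepends the missing '0's
def toBitsB (v : Int) (width : Nat) : List Int :=
  (List.replicate (width - (pvBin v.toNat).length) '0' ++ pvBin v.toNat).map
    (fun c => if c = '1' then (1 : Int) else 0)

def ALU_alt (x : List Int) (y : List Int) (zx : Int) (nx : Int) (zy : Int) (ny : Int) (f : Int) (no : Int) : List Int × Int × Int :=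
  let n := x.length
  let mask : Int := 2 ^ n - 1        -- (1 << n) - 1
  let xi := toIntB x
  let yi := toIntB y
  let xi := if zx = 1 then 0 else xi
  let xi := if nx = 1 then mask - xi else xi
  let yi := if zy = 1 then 0 else yi
  let yi := if ny = 1 then mask - yi else yi
  let oi : Int := if f = 1 then PySem.Int.mod (xi + yi) (2 ^ n)
    else if f = 0 then PySem.Int.band xi yi else 0
  let oi := if no = 1 then mask - oi else oi
  (toBitsB oi n, if oi = 0 then 1 else 0, if 2 ^ n ≤ 2 * oi then 1 else 0)

-- ===== PRECONDITION & SPEC =====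
-- Pre_ALU is the function's natural domain: x non-empty (width ≥ 2 when the
-- output is complemented), and — when f actually selects an operation — x and
-- y equal-width 0/1 bit vectors of width ≥ 2 (only then are their entries
-- read).  Outside it A either raises (ValueError from int(s, 2) on non-binary
-- digit strings — including every one-bit output [1] — or IndexError from
-- y[i] / binary_str[0]) or returns accidental values of its string/loop
-- implementation: string concatenation of non-bit ints, the index-aligned AND
-- and max-width addition of unequal-width operands, truthiness on non-bit
-- entries; see the cites in claim.json.
def Pre_ALU (x : List Int) (y : List Int) (zx : Int) (nx : Int) (zy : Int) (ny : Int) (f : Int) (no : Int) : Prop :=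
  1 ≤ x.length ∧ (no = 1 → 2 ≤ x.length) ∧
  ((f = 0 ∨ f = 1) →
    ((∀ b ∈ x, b = 0 ∨ b = 1) ∧ (∀ b ∈ y, b = 0 ∨ b = 1) ∧ 2 ≤ x.length ∧ x.length = y.length))
instance (x : List Int) (y : List Int) (zx : Int) (nx : Int) (zy : Int) (ny : Int) (f : Int) (no : Int) : Decidable (Pre_ALU x y zx nx zy ny f no) := by unfold Pre_ALU; infer_instance

def pvWitness_ALU : List Int × List Int × Int × Int × Int × Int × Int × Int :=
  ([0, 1], [1, 0], 0, 0, 0, 0, 0, 0)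

def Spec_ALU (x : List Int) (y : List Int) (zx : Int) (nx : Int) (zy : Int) (ny : Int) (f : Int) (no : Int) (out : List Int × Int × Int) : Prop := out = ALU_alt x y zx nx zy ny f no
instance (x : List Int) (y : List Int) (zx : Int) (nx : Int) (zy : Int) (ny : Int) (f : Int) (no : Int) (out : List Int × Int × Int) : Decidable (Spec_ALU x y zx nx zy ny f no out) := by unfold Spec_ALU; infer_instance

-- ===== CLAIM (what is proved, stated in full; the proofs are below) =====
def Claim_equal_ALU : Prop := ∀ (x : List Int) (y : List Int) (zx : Int) (nx : Int) (zy : Int) (ny : Int) (f : Int) (no : Int), Dom_ALU x y zx nx zy ny f no → Pre_ALU x y zx nx zy ny f no → Spec_ALU x y zx nx zy ny f no (ALU x y zx nx zy ny f no)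

-- ===== LEMMAS AND PROOFS =====

-- `pvIsBits l`: every entry of l is the int 0 or 1
def pvIsBits (l : List Int) : Prop := ∀ b ∈ l, b = 0 ∨ b = 1

-- little-endian value of a bit list
def pvLV : List Int → Nat
  | [] => 0
  | b :: t => b.toNat + 2 * pvLV t

theorem pvIsBits_tail {b : Int} {t : List Int} (h : pvIsBits (b :: t)) : pvIsBits t :=
  fun c hc => h c (by simp [hc])

theorem pvIsBits_head {b : Int} {t : List Int} (h : pvIsBits (b :: t)) : b = 0 ∨ b = 1 :=
  h b (by simp)

theorem pvIsBits_reverse {l : List Int} (h : pvIsBits l) : pvIsBits l.reverse :=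
  fun c hc => h c (List.mem_reverse.mp hc)

theorem pvLV_lt (l : List Int) (h : pvIsBits l) : pvLV l < 2 ^ l.length := by
  induction l with
  | nil => simp [pvLV]
  | cons b t ih =>
    have hb := pvIsBits_head h
    have ht := ih (pvIsBits_tail h)
    have hb1 : b.toNat ≤ 1 := by rcases hb with h' | h' <;> simp [h']
    simp only [pvLV, List.length_cons, pow_succ]
    omega

theorem pvLV_append (l₁ l₂ : List Int) :
    pvLV (l₁ ++ l₂) = pvLV l₁ + 2 ^ l₁.length * pvLV l₂ := by
  induction l₁ with
  | nil => simp [pvLV]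
  | cons b t ih => simp only [List.cons_append, pvLV, List.length_cons, pow_succ, ih]; ring

theorem pvLV_replicate_zero (n : Nat) : pvLV (List.replicate n 0) = 0 := by
  induction n with
  | zero => simp [pvLV]
  | succ n ih => simp [List.replicate_succ, pvLV, ih]

theorem pvLV_eq_zero_iff (l : List Int) (h : pvIsBits l) :
    pvLV l = 0 ↔ ∀ b ∈ l, b = 0 := by
  induction l with
  | nil => simp [pvLV]
  | cons b t ih =>
    have hb := pvIsBits_head h
    have ht := ih (pvIsBits_tail h)
    constructor
    · intro h0
      have h0' : b.toNat + 2 * pvLV t = 0 := h0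
      have hb0 : b = 0 := by
        rcases hb with h' | h'
        · exact h'
        · subst h'; simp at h0'
      intro c hc
      rcases List.mem_cons.mp hc with rfl | hc'
      · exact hb0
      · exact (ht.mp (by omega)) c hc'
    · intro hall
      have hb0 : b = 0 := hall b (List.mem_cons_self ..)
      have ht0 : pvLV t = 0 := ht.mpr (fun c hc => hall c (List.mem_cons_of_mem _ hc))
      show b.toNat + 2 * pvLV t = 0
      simp [hb0, ht0]

theorem pvLV_unique (l₁ : List Int) : ∀ (l₂ : List Int), pvIsBits l₁ → pvIsBits l₂ →
    l₁.length = l₂.length → pvLV l₁ = pvLV l₂ → l₁ = l₂ := by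
  induction l₁ with
  | nil => intro l₂ _ _ hlen _; cases l₂ with
    | nil => rfl
    | cons c s => simp at hlen
  | cons b t ih =>
    intro l₂ h₁ h₂ hlen hv
    cases l₂ with
    | nil => simp at hlen
    | cons c s =>
      have hb := pvIsBits_head h₁
      have hc := pvIsBits_head h₂
      have hv' : b.toNat + 2 * pvLV t = c.toNat + 2 * pvLV s := hv
      have hbn : b.toNat ≤ 1 := by rcases hb with h' | h' <;> simp [h']
      have hcn : c.toNat ≤ 1 := by rcases hc with h' | h' <;> simp [h']
      have heq : b.toNat = c.toNat ∧ pvLV t = pvLV s := by omega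
      have hbc : b = c := by
        rcases hb with h' | h' <;> rcases hc with h'' | h'' <;>
          simp [h', h''] at heq ⊢
      subst hbc
      have : t = s := ih s (pvIsBits_tail h₁) (pvIsBits_tail h₂) (by simpa using hlen) heq.2
      rw [this]

-- ''.join(map(str, l)) on a bit list is just its digit characters
theorem pvJoinStr_eq (l : List Int) (h : pvIsBits l) :
    pvJoinStr l = l.map (fun b => if b = 1 then '1' else '0') := by
  induction l with
  | nil => rfl
  | cons b t ih =>
    have ht := ih (pvIsBits_tail h)
    rcases pvIsBits_head h with h' | h' <;> subst h' <;>
      simp only [pvJoinStr, List.flatMap_cons, List.map_cons] at ht ⊢ <;> rw [ht] <;> rfl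

-- the two folds agree on bit lists
theorem pvBitVal_map_aux (l : List Int) (h : pvIsBits l) : ∀ a : Int,
    (l.map (fun b => if b = 1 then '1' else '0')).foldl (fun v c => 2 * v + (if c = '1' then 1 else 0)) a
      = l.foldl (fun v b => 2 * v + b) a := by
  induction l with
  | nil => intro a; rfl
  | cons b t ih =>
    intro a
    have ht := ih (pvIsBits_tail h)
    rcases pvIsBits_head h with h' | h' <;> subst h'
    · simp only [List.map_cons, List.foldl_cons]
      rw [ht]
      norm_num
      rw [show (if ('0':Char) = '1' then (1:Int) else 0) = 0 from by decide, add_zero]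
    · simp only [List.map_cons, List.foldl_cons]
      rw [ht]
      norm_num

theorem toIntB_aux (l : List Int) (h : pvIsBits l) : ∀ a : Int,
    l.foldl (fun v b => 2 * v + b) a = a * 2 ^ l.length + (pvLV l.reverse : Int) := by
  induction l with
  | nil => intro a; simp [pvLV]
  | cons b t ih =>
    intro a
    have ht := ih (pvIsBits_tail h)
    have hb : (b : Int) = (b.toNat : Int) := by
      rcases pvIsBits_head h with h' | h' <;> simp [h']
    have happ : pvLV ((b :: t).reverse) = pvLV t.reverse + 2 ^ t.length * b.toNat := by
      rw [List.reverse_cons, pvLV_append]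
      simp [pvLV]
    simp only [List.foldl_cons, List.length_cons]
    rw [ht (2 * a + b), happ]
    push_cast
    conv_lhs => rw [hb]
    ring

theorem pvBitVal_eq (l : List Int) (h : pvIsBits l) :
    pvBitVal (l.map (fun b => if b = 1 then '1' else '0')) = (pvLV l.reverse : Int) := by
  unfold pvBitVal
  rw [pvBitVal_map_aux l h 0, toIntB_aux l h 0]; simp

theorem toIntB_eq (l : List Int) (h : pvIsBits l) : toIntB l = (pvLV l.reverse : Int) := by
  unfold toIntB
  split
  · subst ‹l = []›; simp [pvLV]
  · exact pvBitVal_eq l h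

theorem pvBitVal_nonneg_aux (cs : List Char) : ∀ a : Int, 0 ≤ a →
    0 ≤ cs.foldl (fun v c => 2 * v + (if c = '1' then 1 else 0)) a := by
  induction cs with
  | nil => intro a ha; simpa using ha
  | cons c t ih =>
    intro a ha
    simp only [List.foldl_cons]
    exact ih _ (by split <;> omega)

theorem pvBitVal_nonneg (cs : List Char) : 0 ≤ pvBitVal cs :=
  pvBitVal_nonneg_aux cs 0 le_rfl

-- complementing a bit list
theorem pvFlip_bits (l : List Int) :
    pvIsBits (l.map (fun b => if b = 1 then (0 : Int) else 1)) := by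
  intro c hc
  simp only [List.mem_map] at hc
  obtain ⟨b, _, rfl⟩ := hc
  split <;> simp

theorem pvLV_flip (l : List Int) (h : pvIsBits l) :
    pvLV (l.map (fun b => if b = 1 then (0 : Int) else 1)) = 2 ^ l.length - 1 - pvLV l := by
  induction l with
  | nil => simp [pvLV]
  | cons b t ih =>
    have ht := ih (pvIsBits_tail h)
    have hlt := pvLV_lt t (pvIsBits_tail h)
    have h2 : (2:Nat) ^ (b :: t).length = 2 * 2 ^ t.length := by
      simp [pow_succ]; ring
    rcases pvIsBits_head h with h' | h' <;> subst h' <;>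
      simp only [List.map_cons, pvLV, ht, h2] <;> norm_num <;> omega

theorem pvBits_map_zero (l : List Int) : pvIsBits (l.map (fun _ => (0 : Int))) := by
  intro c hc; simp only [List.mem_map] at hc; obtain ⟨b, _, rfl⟩ := hc; left; rfl

theorem pvLV_map_zero (l : List Int) : pvLV (l.map (fun _ => (0 : Int))) = 0 := by
  induction l with
  | nil => rfl
  | cons b t ih =>
    show (0:Int).toNat + 2 * pvLV (t.map (fun _ => (0 : Int))) = 0
    rw [ih]
    decide

-- scalar bitwise-and recursion
theorem pvLand_scalar (p q m n : Nat) (hp : p ≤ 1) (hq : q ≤ 1) :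
    (p + 2 * m) &&& (q + 2 * n) = (p &&& q) + 2 * (m &&& n) := by
  apply Nat.eq_of_testBit_eq
  intro i
  cases i with
  | zero =>
    have e1 : (p + 2 * m) % 2 = p := by omega
    have e2 : (q + 2 * n) % 2 = q := by omega
    have hpq : p &&& q ≤ 1 := by
      interval_cases p <;> interval_cases q <;> decide
    have e3 : ((p &&& q) + 2 * (m &&& n)) % 2 = p &&& q := by omega
    rw [Nat.testBit_land, Nat.testBit_zero, Nat.testBit_zero, Nat.testBit_zero, e1, e2, e3]
    interval_cases p <;> interval_cases q <;> decide
  | succ i =>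
    have e1 : (p + 2 * m) / 2 = m := by omega
    have e2 : (q + 2 * n) / 2 = n := by omega
    have e3 : ((p &&& q) + 2 * (m &&& n)) / 2 = m &&& n := by
      have : p &&& q ≤ 1 := by interval_cases p <;> interval_cases q <;> decide
      omega
    rw [Nat.testBit_land, Nat.testBit_succ, Nat.testBit_succ, Nat.testBit_succ, e1, e2, e3,
      Nat.testBit_land]

theorem pvLV_zip (a : List Int) : ∀ (b : List Int), pvIsBits a → pvIsBits b →
    a.length = b.length →
    pvLV (List.zipWith (fun u v => if u ≠ 0 ∧ v ≠ 0 then (1 : Int) else 0) a b)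
      = pvLV a &&& pvLV b := by
  induction a with
  | nil =>
    intro b _ _ _
    simp [pvLV]
  | cons p t ih =>
    intro b h1 h2 hlen
    cases b with
    | nil => simp at hlen
    | cons q s =>
      have hp := pvIsBits_head h1
      have hq := pvIsBits_head h2
      have hih := ih s (pvIsBits_tail h1) (pvIsBits_tail h2) (by simpa using hlen)
      have hpn : p.toNat ≤ 1 := by rcases hp with h' | h' <;> simp [h']
      have hqn : q.toNat ≤ 1 := by rcases hq with h' | h' <;> simp [h']
      have hand : (if p ≠ 0 ∧ q ≠ 0 then (1 : Int) else 0).toNat = p.toNat &&& q.toNat := by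
        rcases hp with h' | h' <;> rcases hq with h'' | h'' <;> subst h' <;> subst h'' <;> decide
      show (if p ≠ 0 ∧ q ≠ 0 then (1 : Int) else 0).toNat + 2 * pvLV (List.zipWith _ t s)
          = (p.toNat + 2 * pvLV t) &&& (q.toNat + 2 * pvLV s)
      rw [pvLand_scalar _ _ _ _ hpn hqn, hand, hih]

theorem pvLand_mask (n w : Nat) : n &&& (2 ^ w - 1) = n % 2 ^ w := by
  apply Nat.eq_of_testBit_eq
  intro i
  rw [Nat.testBit_land, Nat.testBit_two_pow_sub_one, Nat.testBit_mod_two_pow, Bool.and_comm]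

-- sign of A's binary_to_signed on a bit list of length ≥ 1
theorem pvNg_iff (l : List Int) (h : pvIsBits l) (hne : 1 ≤ l.length) :
    (binary_to_signed l < 0 ↔ 2 ^ l.length ≤ 2 * pvLV l.reverse) := by
  cases l with
  | nil => simp at hne
  | cons b t =>
    have hjs := pvJoinStr_eq (b :: t) h
    have ht := pvIsBits_tail h
    have hlt : pvLV t.reverse < 2 ^ t.length := by
      have := pvLV_lt t.reverse (pvIsBits_reverse ht)
      simpa using this
    have hpow : (2:Nat) ^ (t.length + 1) = 2 * 2 ^ t.length := by ring
    unfold binary_to_signed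
    rw [hjs]
    simp only [List.map_cons, List.length_cons, List.reverse_cons]
    rcases pvIsBits_head h with h' | h' <;> subst h'
    · -- leading bit 0: value is nonnegative, high bit clear
      rw [show PySem.List.pyGet? ((if (0:Int) = 1 then '1' else '0') :: List.map (fun b => if b = 1 then '1' else '0') t) 0
            = some (if (0:Int) = 1 then '1' else '0') from by simp [PySem.List.pyGet?, PySem.List.pyIdx?]]
      rw [if_neg (by decide : ¬ (some (if (0:Int) = 1 then '1' else '0') = some '1'))]
      rw [show (if (0:Int) = 1 then '1' else '0') = '0' from by norm_num]
      have hv : pvBitVal ('0' :: List.map (fun b => if b = 1 then '1' else '0') t)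
          = (pvLV (t.reverse ++ [(0:Int)]) : Int) := by
        have h0 := pvBitVal_eq ((0:Int) :: t) h
        simp only [List.map_cons, List.reverse_cons] at h0
        rw [show (if (0:Int) = 1 then '1' else '0') = '0' from by norm_num] at h0
        exact h0
      have hrev : pvLV (t.reverse ++ [(0:Int)]) = pvLV t.reverse := by
        rw [pvLV_append]; simp [pvLV]
      rw [hv, hrev]
      constructor
      · intro hneg; omega
      · intro hge; omega
    · -- leading bit 1: value is negative, high bit set
      rw [show PySem.List.pyGet? ((if (1:Int) = 1 then '1' else '0') :: List.map (fun b => if b = 1 then '1' else '0') t) 0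
            = some (if (1:Int) = 1 then '1' else '0') from by simp [PySem.List.pyGet?, PySem.List.pyIdx?]]
      rw [if_pos (by decide : (some (if (1:Int) = 1 then '1' else '0') = some '1'))]
      rw [show (if (1:Int) = 1 then '1' else '0') = '1' from by norm_num]
      have hrev : pvLV (t.reverse ++ [(1:Int)]) = pvLV t.reverse + 2 ^ t.length := by
        rw [pvLV_append]; simp [pvLV]
      rw [hrev]
      constructor
      · intro _; omega
      · intro _
        have hnn := pvBitVal_nonneg ((('1' :: List.map (fun b => if b = 1 then '1' else '0') t).drop 1).map
          (fun ch => if ch = '0' then '1' else '0'))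
        omega

-- value of a digit list rendered to 0/1 ints
theorem pvOfDigits (ds : List Nat) (h : ∀ d ∈ ds, d < 2) :
    pvLV (ds.map (fun d => if d = 1 then (1:Int) else 0)) = Nat.ofDigits 2 ds := by
  induction ds with
  | nil => simp [pvLV, Nat.ofDigits]
  | cons d t ih =>
    have hd := h d (List.mem_cons_self ..)
    have ht := ih (fun c hc => h c (List.mem_cons_of_mem _ hc))
    show (if d = 1 then (1:Int) else 0).toNat + 2 * pvLV (t.map _) = _
    rw [ht, Nat.ofDigits_cons]
    interval_cases d <;> simp

-- the bin(m) digit string, decoded back to ints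
theorem pvBin_facts (m : Nat) :
    pvIsBits ((pvBin m).map (fun c => if c = '1' then (1:Int) else 0)) ∧
    pvLV (((pvBin m).map (fun c => if c = '1' then (1:Int) else 0)).reverse) = m ∧
    1 ≤ (pvBin m).length ∧ (∀ w, 1 ≤ w → m < 2 ^ w → (pvBin m).length ≤ w) := by
  by_cases hm : m = 0
  · subst hm
    refine ⟨?_, ?_, ?_, ?_⟩ <;> simp [pvBin, pvLV, pvIsBits]
  · have hdig : ∀ d ∈ Nat.digits 2 m, d < 2 := fun d hd => Nat.digits_lt_base (by norm_num) hd
    have hmap : ((pvBin m).map (fun c => if c = '1' then (1:Int) else 0))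
        = ((Nat.digits 2 m).reverse.map (fun d => if d = 1 then (1:Int) else 0)) := by
      rw [pvBin, if_neg hm, List.map_map]
      apply List.map_congr_left
      intro d hd
      have : d < 2 := hdig d (List.mem_reverse.mp hd)
      interval_cases d <;> simp
    refine ⟨?_, ?_, ?_, ?_⟩
    · rw [hmap]
      intro c hc
      simp only [List.mem_map] at hc
      obtain ⟨d, _, rfl⟩ := hc
      split <;> simp
    · rw [hmap, ← List.map_reverse, List.reverse_reverse, pvOfDigits _ hdig, Nat.ofDigits_digits]
    · rw [pvBin, if_neg hm]
      simp only [List.length_map, List.length_reverse]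
      cases hh : Nat.digits 2 m with
      | nil => exact absurd hh (Nat.digits_ne_nil_iff_ne_zero.mpr hm)
      | cons d t => simp
    · intro w _ hmw
      rw [pvBin, if_neg hm]
      simp only [List.length_map, List.length_reverse]
      exact (Nat.digits_length_le_iff (by norm_num) m).mpr hmw

theorem pvTwos (a b : List Int) (ha : pvIsBits a) (hb : pvIsBits b)
    (hmax : 1 ≤ max a.length b.length) :
    pvIsBits (twos_complement_addition a b) ∧
    (twos_complement_addition a b).length = max a.length b.length ∧
    pvLV (twos_complement_addition a b).reverse
      = (pvLV a.reverse + pvLV b.reverse) % 2 ^ (max a.length b.length) := by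
  have hja := pvJoinStr_eq a ha
  have hjb := pvJoinStr_eq b hb
  have hla : (pvJoinStr a).length = a.length := by rw [hja]; simp
  have hlb : (pvJoinStr b).length = b.length := by rw [hjb]; simp
  have hva : pvBitVal (pvJoinStr a) = (pvLV a.reverse : Int) := by rw [hja]; exact pvBitVal_eq a ha
  have hvb : pvBitVal (pvJoinStr b) = (pvLV b.reverse : Int) := by rw [hjb]; exact pvBitVal_eq b hb
  simp only [twos_complement_addition, hla, hlb, hva, hvb]
  set M := max a.length b.length with hM
  set X := pvLV a.reverse
  set Y := pvLV b.reverse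
  have hband : PySem.Int.band ((X:Int) + (Y:Int)) (2 ^ M - 1) = (((X + Y) % 2 ^ M : Nat) : Int) := by
    have h1 : ((X:Int) + (Y:Int)) = ((X + Y : Nat) : Int) := by push_cast; ring
    have h2 : ((2:Int) ^ M - 1) = ((2 ^ M - 1 : Nat) : Int) := by
      have : (1:Nat) ≤ 2 ^ M := Nat.one_le_two_pow
      push_cast [this]
      ring
    rw [h1, h2, PySem.Int.band_natCast, pvLand_mask]
  rw [hband]
  set m := (X + Y) % 2 ^ M with hm
  have hmlt : m < 2 ^ M := Nat.mod_lt _ (Nat.two_pow_pos M)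
  have htn : (((m : Nat) : Int)).toNat = m := by simp
  rw [htn]
  obtain ⟨hb1, hb2, hb3, hb4⟩ := pvBin_facts m
  have hlen : ((pvBin m).map (fun c => if c = '1' then (1:Int) else 0)).length = (pvBin m).length := by
    simp
  by_cases hcase : ((pvBin m).map (fun c => if c = '1' then (1:Int) else 0)).length < M
  · rw [if_pos hcase]
    refine ⟨?_, ?_, ?_⟩
    · intro c hc
      rcases List.mem_append.mp hc with h' | h'
      · left; exact List.eq_of_mem_replicate h'
      · exact hb1 c h'
    · simp only [List.length_append, List.length_replicate]
      omega
    · rw [List.reverse_append, List.reverse_replicate, pvLV_append, hb2, pvLV_replicate_zero]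
      simp
  · rw [if_neg hcase]
    have : (pvBin m).length ≤ M := hb4 M hmax hmlt
    have hexact : ((pvBin m).map (fun c => if c = '1' then (1:Int) else 0)).length = M := by
      rw [hlen]; omega
    exact ⟨hb1, hexact, hb2⟩

theorem pvZipWith_bits (a : List Int) : ∀ b : List Int,
    pvIsBits (List.zipWith (fun u v => if u ≠ 0 ∧ v ≠ 0 then (1:Int) else 0) a b) := by
  induction a with
  | nil => intro b c hc; simp at hc
  | cons p t ih =>
    intro b
    cases b with
    | nil => intro c hc; simp at hc
    | cons q s =>
      intro c hc
      rcases List.mem_cons.mp hc with rfl | h'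
      · simp only []
        split <;> simp
      · exact ih s c h'

theorem pvLV_drop (l : List Int) (h : pvIsBits l) (s : Nat) :
    pvLV (l.drop s) = pvLV l / 2 ^ s := by
  induction s generalizing l with
  | zero => simp
  | succ s ih =>
    cases l with
    | nil => simp [pvLV]
    | cons b t =>
      have hb : b.toNat ≤ 1 := by rcases pvIsBits_head h with h' | h' <;> simp [h']
      rw [List.drop_succ_cons, ih t (pvIsBits_tail h)]
      have h2 : (2:Nat) ^ (s + 1) = 2 * 2 ^ s := by rw [pow_succ]; ring
      have h3 : pvLV (b :: t) / 2 = pvLV t := by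
        show (b.toNat + 2 * pvLV t) / 2 = pvLV t
        omega
      rw [h2, ← Nat.div_div_eq_div_mul, h3]

-- A's f = 0 output list
theorem pvAndFacts (a b : List Int) (ha : pvIsBits a) (hb : pvIsBits b)
    (hle : a.length ≤ b.length) :
    pvIsBits ((List.range a.length).map (fun i => if a.getD i 0 ≠ 0 ∧ b.getD i 0 ≠ 0 then (1:Int) else 0)) ∧
    ((List.range a.length).map (fun i => if a.getD i 0 ≠ 0 ∧ b.getD i 0 ≠ 0 then (1:Int) else 0)).length = a.length ∧
    pvLV ((List.range a.length).map (fun i => if a.getD i 0 ≠ 0 ∧ b.getD i 0 ≠ 0 then (1:Int) else 0)).reverse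
      = pvLV a.reverse &&& (pvLV b.reverse / 2 ^ (b.length - a.length)) := by
  have hzip : (List.range a.length).map (fun i => if a.getD i 0 ≠ 0 ∧ b.getD i 0 ≠ 0 then (1:Int) else 0)
      = List.zipWith (fun u v => if u ≠ 0 ∧ v ≠ 0 then (1:Int) else 0) a (b.take a.length) := by
    apply List.ext_getElem
    · simp; omega
    · intro i h1 h2
      have hia : i < a.length := by simpa using h1
      have hib : i < b.length := by omega
      simp only [List.getElem_map, List.getElem_range, List.getElem_zipWith, List.getElem_take]
      rw [List.getD_eq_getElem a 0 hia, List.getD_eq_getElem b 0 hib]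
  have htlen : (b.take a.length).length = a.length := by simp; omega
  refine ⟨?_, ?_, ?_⟩
  · rw [hzip]
    exact pvZipWith_bits a (b.take a.length)
  · simp
  · rw [hzip, List.reverse_zipWith (by omega), List.reverse_take]
    have hbits_drop : pvIsBits (b.reverse.drop (b.length - a.length)) :=
      fun c hc => hb c (List.mem_reverse.mp (List.mem_of_mem_drop hc))
    rw [pvLV_zip a.reverse (b.reverse.drop (b.length - a.length)) (pvIsBits_reverse ha) hbits_drop
      (by simp; omega)]
    rw [pvLV_drop b.reverse (pvIsBits_reverse hb) (b.length - a.length)]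

-- the zx/nx (zy/ny) stage, list side vs integer side
theorem pvTransform (x x0 x1 : List Int) (z n : Int) (hx : pvIsBits x)
    (h0 : x0 = if z = 1 then x.map (fun _ => (0:Int)) else x)
    (h1 : x1 = if n = 1 then x0.map (fun b => if b = 1 then (0:Int) else 1) else x0) :
    pvIsBits x1 ∧ x1.length = x.length ∧
    (if n = 1 then 2 ^ x.length - 1 - (if z = 1 then (0:Int) else toIntB x) else (if z = 1 then (0:Int) else toIntB x))
      = (pvLV x1.reverse : Int) := by
  have hx0b : pvIsBits x0 := by
    subst h0; split
    · exact pvBits_map_zero x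
    · exact hx
  have hx0l : x0.length = x.length := by subst h0; split <;> simp
  have hx0v : (if z = 1 then (0:Int) else toIntB x) = (pvLV x0.reverse : Int) := by
    subst h0; split
    · rw [← List.map_reverse, pvLV_map_zero]; simp
    · exact toIntB_eq x hx
  have hx0lt : pvLV x0.reverse < 2 ^ x.length := by
    have := pvLV_lt x0.reverse (pvIsBits_reverse hx0b)
    simpa [hx0l] using this
  subst h1
  split
  · refine ⟨pvFlip_bits x0, by simpa using hx0l, ?_⟩
    rw [hx0v, ← List.map_reverse, pvLV_flip x0.reverse (pvIsBits_reverse hx0b)]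
    have hlen : x0.reverse.length = x.length := by simpa using hx0l
    rw [hlen]
    have h1le : (1:Nat) ≤ 2 ^ x.length := Nat.one_le_two_pow
    push_cast [Nat.cast_sub (by omega : pvLV x0.reverse ≤ 2 ^ x.length - 1), Nat.cast_sub h1le]
    ring
  · exact ⟨hx0b, hx0l, hx0v⟩

-- decoding the final value: the three returned components agree
theorem toBitsB_facts (N w : Nat) (hw : 1 ≤ w) (hN : N < 2 ^ w) :
    pvIsBits (toBitsB (N : Int) w) ∧ (toBitsB (N : Int) w).length = w ∧
    pvLV (toBitsB (N : Int) w).reverse = N := by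
  obtain ⟨hb1, hb2, hb3, hb4⟩ := pvBin_facts N
  unfold toBitsB
  simp only [Int.toNat_natCast, List.map_append, List.map_replicate]
  rw [show (if ('0':Char) = '1' then (1:Int) else 0) = 0 from by decide]
  have hlen : (pvBin N).length ≤ w := hb4 w hw hN
  refine ⟨?_, ?_, ?_⟩
  · intro c hc
    rcases List.mem_append.mp hc with h' | h'
    · left; exact List.eq_of_mem_replicate h'
    · exact hb1 c h'
  · simp
    omega
  · rw [List.reverse_append, List.reverse_replicate, pvLV_append, hb2, pvLV_replicate_zero]
    simp

theorem pvOut_eq (o : List Int) (w N : Nat) (ho : pvIsBits o) (hl : o.length = w) (hw : 1 ≤ w)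
    (hv : pvLV o.reverse = N) (hN : N < 2 ^ w) : o = toBitsB (N : Int) w := by
  obtain ⟨hc1, hc2, hc3⟩ := toBitsB_facts N w hw hN
  have : o.reverse = (toBitsB (N : Int) w).reverse :=
    pvLV_unique _ _ (pvIsBits_reverse ho) (pvIsBits_reverse hc1)
      (by simp [hl, hc2]) (by rw [hv, hc3])
  exact List.reverse_injective this

theorem pvZr_eq (o : List Int) (N : Nat) (ho : pvIsBits o) (hv : pvLV o.reverse = N) :
    (if o.all (fun b => b == 0) then (1:Int) else 0) = (if (N:Int) = 0 then 1 else 0) := by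
  have h1 : (o.all (fun b => b == 0) = true) ↔ (N : Int) = 0 := by
    rw [List.all_eq_true]
    constructor
    · intro hall
      have h0 : pvLV o.reverse = 0 := (pvLV_eq_zero_iff o.reverse (pvIsBits_reverse ho)).mpr
        (fun c hc => by have := hall c (List.mem_reverse.mp hc); simpa using this)
      have : N = 0 := by omega
      simp [this]
    · intro h0
      have hN0 : N = 0 := by exact_mod_cast h0
      intro c hc
      have := (pvLV_eq_zero_iff o.reverse (pvIsBits_reverse ho)).mp (by omega) c (List.mem_reverse.mpr hc)
      simp [this]
  by_cases hc : (N:Int) = 0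
  · rw [if_pos (h1.mpr hc), if_pos hc]
  · rw [if_neg (fun hh => hc (h1.mp hh)), if_neg hc]

theorem pvNg_eq (o : List Int) (w N : Nat) (ho : pvIsBits o) (hl : o.length = w) (hw : 1 ≤ w)
    (hv : pvLV o.reverse = N) :
    (if binary_to_signed o < 0 then (1:Int) else 0) = (if (2:Int) ^ w ≤ 2 * (N:Int) then 1 else 0) := by
  have hiff := pvNg_iff o ho (by omega)
  rw [hl, hv] at hiff
  have h2 : ((2:Nat) ^ w ≤ 2 * N) ↔ ((2:Int) ^ w ≤ 2 * (N:Int)) := by exact_mod_cast Iff.rfl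
  by_cases hc : binary_to_signed o < 0
  · rw [if_pos hc, if_pos (h2.mp (hiff.mp hc))]
  · rw [if_neg hc, if_neg (fun hh => hc (hiff.mpr (h2.mpr hh)))]

-- the common tail of both programs (optional complement, then out/zr/ng)
theorem pvPost (o : List Int) (w N : Nat) (no : Int) (ho : pvIsBits o) (hl : o.length = w)
    (hw : 1 ≤ w) (hv : pvLV o.reverse = N) (hN : N < 2 ^ w) :
    ((if no = 1 then o.map (fun b => if b = 1 then (0:Int) else 1) else o),
      (if (if no = 1 then o.map (fun b => if b = 1 then (0:Int) else 1) else o).all (fun b => b == 0) then (1:Int) else 0),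
      (if binary_to_signed (if no = 1 then o.map (fun b => if b = 1 then (0:Int) else 1) else o) < 0 then (1:Int) else 0))
    = (toBitsB (if no = 1 then 2 ^ w - 1 - (N:Int) else (N:Int)) w,
       (if (if no = 1 then 2 ^ w - 1 - (N:Int) else (N:Int)) = 0 then (1:Int) else 0),
       (if (2:Int) ^ w ≤ 2 * (if no = 1 then 2 ^ w - 1 - (N:Int) else (N:Int)) then (1:Int) else 0)) := by
  by_cases hno : no = 1
  · simp only [if_pos hno]
    have hb' := pvFlip_bits o
    have hl' : (o.map (fun b => if b = 1 then (0:Int) else 1)).length = w := by simpa using hl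
    have hv' : pvLV (o.map (fun b => if b = 1 then (0:Int) else 1)).reverse = 2 ^ w - 1 - N := by
      rw [← List.map_reverse, pvLV_flip o.reverse (pvIsBits_reverse ho), hv]
      have : o.reverse.length = w := by simpa using hl
      rw [this]
    have h1le : (1:Nat) ≤ 2 ^ w := Nat.one_le_two_pow
    have hcast : (2:Int) ^ w - 1 - (N:Int) = ((2 ^ w - 1 - N : Nat) : Int) := by
      push_cast [Nat.cast_sub (by omega : N ≤ 2 ^ w - 1), Nat.cast_sub h1le]
      ring
    rw [hcast]
    simp only [Prod.mk.injEq]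
    refine ⟨?_, ?_, ?_⟩
    · exact pvOut_eq _ w _ hb' hl' hw hv' (by omega)
    · exact pvZr_eq _ _ hb' hv'
    · exact pvNg_eq _ w _ hb' hl' hw hv'
  · simp only [if_neg hno]
    simp only [Prod.mk.injEq]
    refine ⟨?_, ?_, ?_⟩
    · exact pvOut_eq o w N ho hl hw hv hN
    · exact pvZr_eq o N ho hv
    · exact pvNg_eq o w N ho hl hw hv

-- ===== VERDICT (by name: the statement is the Claim_ definition above) =====
theorem ALU_spec : Claim_equal_ALU := by
  unfold Claim_equal_ALU
  intro x y zx nx zy ny f no _ hpre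
  obtain ⟨hlen1, _hno2, hbits⟩ := hpre
  unfold Spec_ALU
  simp only [ALU, ALU_alt]
  set xA := if nx = 1 then List.map (fun b => if b = 1 then (0:Int) else 1) (if zx = 1 then List.map (fun _ => (0:Int)) x else x) else if zx = 1 then List.map (fun _ => (0:Int)) x else x with hxA
  set yA := if ny = 1 then List.map (fun b => if b = 1 then (0:Int) else 1) (if zy = 1 then List.map (fun _ => (0:Int)) y else y) else if zy = 1 then List.map (fun _ => (0:Int)) y else y with hyA
  by_cases hf01 : f = 0 ∨ f = 1
  · obtain ⟨hx, hy, hlen2, heq⟩ := hbits hf01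
    obtain ⟨hxb, hxl, hxv⟩ := pvTransform x _ xA zx nx hx rfl hxA
    obtain ⟨hyb, hyl, hyv⟩ := pvTransform y _ yA zy ny hy rfl hyA
    rw [← heq] at hyv
    rw [hxv, hyv]
    rcases hf01 with hf0 | hf1
    · -- f = 0: bitwise AND
      have hf1' : ¬ f = 1 := by rw [hf0]; norm_num
      simp only [if_neg hf1', if_pos hf0]
      have hle : xA.length ≤ yA.length := by omega
      obtain ⟨ha1, ha2, ha3⟩ := pvAndFacts xA yA hxb hyb hle
      have hsub : yA.length - xA.length = 0 := by omega
      rw [hsub, pow_zero, Nat.div_one] at ha3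
      have hband : PySem.Int.band ((pvLV xA.reverse : Nat) : Int) ((pvLV yA.reverse : Nat) : Int)
          = ((pvLV xA.reverse &&& pvLV yA.reverse : Nat) : Int) := PySem.Int.band_natCast _ _
      rw [hband]
      rw [show x.length = xA.length from hxl.symm]
      have hN : pvLV xA.reverse &&& pvLV yA.reverse < 2 ^ xA.length := by
        have h1 : pvLV xA.reverse < 2 ^ xA.length := by
          have := pvLV_lt xA.reverse (pvIsBits_reverse hxb)
          simpa using this
        exact Nat.lt_of_le_of_lt Nat.and_le_left h1
      exact pvPost _ xA.length _ no ha1 ha2 (by omega) ha3 hN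
    · -- f = 1: addition modulo 2^n
      have hf0' : ¬ f = 0 := by rw [hf1]; norm_num
      simp only [if_pos hf1, if_neg hf0']
      have hmax : max xA.length yA.length = x.length := by omega
      obtain ⟨ht1, ht2, ht3⟩ := pvTwos xA yA hxb hyb (by omega)
      have hmod : PySem.Int.mod ((pvLV xA.reverse : Nat) + (pvLV yA.reverse : Nat) : Int) (2 ^ x.length)
          = (((pvLV xA.reverse + pvLV yA.reverse) % 2 ^ max xA.length yA.length : Nat) : Int) := by
        rw [hmax, PySem.Int.mod_eq_emod_of_pos (by positivity)]
        push_cast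
        ring
      rw [hmod, show x.length = max xA.length yA.length from hmax.symm]
      exact pvPost _ (max xA.length yA.length) _ no ht1 ht2 (by omega) ht3
        (Nat.mod_lt _ (Nat.two_pow_pos _))
  · -- f selects neither operation: out is all zeros whatever x and y hold
    have hf1 : ¬ f = 1 := fun h => hf01 (Or.inr h)
    have hf0 : ¬ f = 0 := fun h => hf01 (Or.inl h)
    simp only [if_neg hf1, if_neg hf0]
    have hrep1 : pvIsBits (List.replicate x.length (0:Int)) :=
      fun c hc => Or.inl (List.eq_of_mem_replicate hc)
    have hrep2 : (List.replicate x.length (0:Int)).length = x.length := by simp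
    have hrep3 : pvLV (List.replicate x.length (0:Int)).reverse = 0 := by
      rw [List.reverse_replicate, pvLV_replicate_zero]
    have h := pvPost (List.replicate x.length (0:Int)) x.length 0 no hrep1 hrep2 (by omega)
      hrep3 (Nat.two_pow_pos _)
    simpa using h
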